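-- pv_equiv track=rewrite | github.com/jgla1ne/survey | streamlit-quiz-app/utils/quiz.py | calculate_score
-- ===== SOURCE A (Python) =====
-- def calculate_score(responses):
--     score = 0
--     for response in responses:
--         if response == 'A':
--             score += 2
--         elif response == 'B':
--             score += 1
--         elif response == 'C':
--             score += 0
--     return score
-- ===== SOURCE B (Python) =====
-- from collections import Counter
--
-- def calculate_score(responses):
--     counts = Counter(responses)
--     return 2 * counts['A'] + counts['B']
-- ===== Notes on version B (the rewrite author's own statement) =====
-- stated objective: idiomatic
-- what changed: Replaces the per-element if/elif accumulation with a Counter histogram built in one pass plus a closed-form combination a closed-form weighted combination of the two scoring keys.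
import Mathlib
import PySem

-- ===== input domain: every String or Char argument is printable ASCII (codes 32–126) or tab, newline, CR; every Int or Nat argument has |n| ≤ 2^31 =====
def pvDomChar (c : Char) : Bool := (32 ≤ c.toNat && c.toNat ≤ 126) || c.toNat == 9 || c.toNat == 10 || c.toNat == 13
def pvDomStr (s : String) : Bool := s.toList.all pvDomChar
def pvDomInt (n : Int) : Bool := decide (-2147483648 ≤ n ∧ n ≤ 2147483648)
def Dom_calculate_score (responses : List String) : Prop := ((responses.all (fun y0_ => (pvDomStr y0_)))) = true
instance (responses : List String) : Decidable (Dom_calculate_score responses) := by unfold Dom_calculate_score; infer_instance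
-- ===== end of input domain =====

-- ===== PORT A =====
def calculate_score (responses : List String) : Int :=
  responses.foldl (fun score response =>
    if response == "A" then score + 2
    else if response == "B" then score + 1
    else if response == "C" then score + 0
    else score) 0

-- ===== PORT B =====
def calculate_score_alt (responses : List String) : Int :=
  2 * (PySem.List.count responses "A" : Int) + (PySem.List.count responses "B" : Int)

-- ===== PRECONDITION & SPEC =====
def Spec_calculate_score (responses : List String) (out : Int) : Prop := out = calculate_score_alt responses
instance (responses : List String) (out : Int) : Decidable (Spec_calculate_score responses out) := by unfold Spec_calculate_score; infer_instance

-- ===== CLAIM (what is proved, stated in full; the proofs are below) =====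
def Claim_equal_calculate_score : Prop := ∀ (responses : List String), Dom_calculate_score responses → Spec_calculate_score responses (calculate_score responses)

-- ===== LEMMAS AND PROOFS =====

-- ===== VERDICT (by name: the statement is the Claim_ definition above) =====
theorem calculate_score_aux (responses : List String) (acc : Int) :
    responses.foldl (fun score response =>
      if response == "A" then score + 2
      else if response == "B" then score + 1
      else if response == "C" then score + 0
      else score) acc
      = acc + 2 * (PySem.List.count responses "A" : Int) + (PySem.List.count responses "B" : Int) := by
  induction responses generalizing acc with
  | nil => simp [PySem.List.count]
  | cons x xs ih =>
    simp only [List.foldl, ih, PySem.List.count, List.count_cons]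
    by_cases hA : x = "A" <;> by_cases hB : x = "B" <;>
      simp [hA, hB] <;> ring

theorem calculate_score_spec : Claim_equal_calculate_score := by
  intro responses _
  unfold Spec_calculate_score calculate_score calculate_score_alt
  rw [calculate_score_aux]; ring
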